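-- pv_equiv track=rewrite | github.com/Axel051171/UnifiedFloppyTool | scripts/audit_plugin_compliance.py | extract_plugin_body
-- ===== SOURCE A (Python) =====
-- def extract_plugin_body(source: str, start: int) -> tuple[int, str] | None:
--     """Given an index `start` pointing at the opening `{` of the plugin
--     initialiser, return (end_index, body_text)."""
--     depth = 0
--     i = start
--     n = len(source)
--     while i < n:
--         c = source[i]
--         if c == "{":
--             depth += 1
--         elif c == "}":
--             depth -= 1
--             if depth == 0:
--                 return i + 1, source[start : i + 1]
--         i += 1
--     return None
-- ===== SOURCE B (Python) =====
-- def extract_plugin_body(source: str, start: int):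
--     """Given an index `start` pointing at the opening `{` of the plugin
--     initialiser, return (end_index, body_text).
--
--     Instead of stepping one character at a time, jump directly from brace
--     to brace with str.find, maintaining the same depth counter."""
--     depth = 0
--     i = start
--     while True:
--         next_open = source.find("{", i)
--         next_close = source.find("}", i)
--         if next_open == -1 and next_close == -1:
--             return None
--         if next_close == -1 or (next_open != -1 and next_open < next_close):
--             j = next_open
--             depth += 1
--         else:
--             j = next_close
--             depth -= 1
--             if depth == 0:
--                 return j + 1, source[start : j + 1]
--         i = j + 1
-- ===== Notes on version B (the rewrite author's own statement) =====
-- stated objective: faster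
-- what changed: B replaces A's per-character Python loop with str.find jumps from brace to brace: same depth counter, but one loop iteration per '{'/'}' instead of per character (find scans in C).
-- outside the precondition, e.g. on extract_plugin_body('{}', -2): A returns (0, ''), B returns (2, '{}')
import Mathlib
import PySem

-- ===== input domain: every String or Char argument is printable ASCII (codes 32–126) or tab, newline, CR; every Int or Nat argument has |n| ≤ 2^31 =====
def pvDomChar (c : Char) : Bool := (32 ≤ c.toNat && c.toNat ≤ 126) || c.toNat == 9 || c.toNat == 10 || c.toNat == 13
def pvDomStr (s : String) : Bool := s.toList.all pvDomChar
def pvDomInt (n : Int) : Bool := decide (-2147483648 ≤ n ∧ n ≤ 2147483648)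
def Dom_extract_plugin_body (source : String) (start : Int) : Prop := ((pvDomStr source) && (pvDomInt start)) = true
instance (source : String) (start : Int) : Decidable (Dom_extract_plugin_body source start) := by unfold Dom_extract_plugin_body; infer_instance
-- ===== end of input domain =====

-- B replaces A's character-by-character scan with str.find jumps from brace to brace
-- (same depth counter, one Python-level loop iteration per brace; measured faster).

-- ===== PORT A =====
-- A's while-loop: depth/i state, one character per iteration.  Fuel counts the remaining
-- iterations (at most n - i, plus one for the final bounds check); the `none` on
-- `pyGet? = none` is Python's IndexError (start < -len), excluded by Pre_.
def pvAloop (cs : List Char) (start : Int) : Int → Int → Nat → Option (Int × String)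
  | _depth, _i, 0 => none
  | depth, i, fuel+1 =>
    if i < (cs.length : Int) then
      match PySem.List.pyGet? cs i with
      | none => none
      | some c =>
        if c = '{' then pvAloop cs start (depth + 1) (i + 1) fuel
        else if c = '}' then
          if depth - 1 = 0 then
            some (i + 1, String.ofList (PySem.List.slice cs (some start) (some (i + 1))))
          else pvAloop cs start (depth - 1) (i + 1) fuel
        else pvAloop cs start depth (i + 1) fuel
    else none

def extract_plugin_body (source : String) (start : Int) : Option (Int × String) :=
  pvAloop source.toList start 0 start (((source.toList.length : Int) - start).toNat + 1)

-- ===== PORT B =====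
-- B's while-loop: jump to the nearer of find('{', i) / find('}', i) each iteration.
-- i strictly increases each round, so length + 2 iterations always suffice.
def pvBloop (cs : List Char) (start : Int) : Int → Int → Nat → Option (Int × String)
  | _depth, _i, 0 => none
  | depth, i, fuel+1 =>
    let no := PySem.Chars.findFrom cs ['{'] i none
    let nc := PySem.Chars.findFrom cs ['}'] i none
    if no = -1 ∧ nc = -1 then none
    else if nc = -1 ∨ (no ≠ -1 ∧ no < nc) then
      pvBloop cs start (depth + 1) (no + 1) fuel
    else
      if depth - 1 = 0 then
        some (nc + 1, String.ofList (PySem.List.slice cs (some start) (some (nc + 1))))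
      else pvBloop cs start (depth - 1) (nc + 1) fuel

def extract_plugin_body_alt (source : String) (start : Int) : Option (Int × String) :=
  pvBloop source.toList start 0 start (source.toList.length + 2)

-- ===== PRECONDITION & SPEC =====
-- Pre_ restricts to the natural domain 0 ≤ start (start is documented to point at the
-- opening '{'); for negative start A applies Python negative-index wraparound and then
-- rescans from index 0 (an implementation artefact) or raises IndexError.
def Pre_extract_plugin_body (source : String) (start : Int) : Prop := 0 ≤ start
instance (source : String) (start : Int) : Decidable (Pre_extract_plugin_body source start) := by
  unfold Pre_extract_plugin_body; infer_instance

def pvWitness_extract_plugin_body : String × Int := ("x = {a: {b}}", 4)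

def Spec_extract_plugin_body (source : String) (start : Int) (out : Option (Int × String)) : Prop := out = extract_plugin_body_alt source start
instance (source : String) (start : Int) (out : Option (Int × String)) : Decidable (Spec_extract_plugin_body source start out) := by unfold Spec_extract_plugin_body; infer_instance

-- ===== CLAIM (what is proved, stated in full; the proofs are below) =====
def Claim_equal_extract_plugin_body : Prop := ∀ (source : String) (start : Int), Dom_extract_plugin_body source start → Pre_extract_plugin_body source start → Spec_extract_plugin_body source start (extract_plugin_body source start)


-- ===== LEMMAS AND PROOFS =====

lemma pv_singleton_prefix (c : Char) (l : List Char) : [c] <+: l ↔ l.head? = some c := by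
  constructor
  · rintro ⟨t, rfl⟩; rfl
  · intro h; cases l with
    | nil => simp at h
    | cons a t => simp at h; subst h; exact ⟨t, rfl⟩

lemma pv_singleton_infix (c : Char) (l : List Char) : [c] <:+: l ↔ c ∈ l := by
  constructor
  · rintro ⟨s, t, rfl⟩; simp
  · intro h; obtain ⟨s, t, rfl⟩ := List.append_of_mem h; exact ⟨s, t, by simp⟩

lemma findFrom_char (cs : List Char) (c : Char) (k : Nat) (hk : k ≤ cs.length) :
    (PySem.Chars.findFrom cs [c] (k : Int) none = -1 ∧
       ∀ m : Nat, k ≤ m → cs[m]? ≠ some c)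
  ∨ (∃ m : Nat, PySem.Chars.findFrom cs [c] (k : Int) none = (m : Int) ∧ k ≤ m ∧
       cs[m]? = some c ∧ ∀ p : Nat, k ≤ p → p < m → cs[p]? ≠ some c) := by
  by_cases h : PySem.Chars.findFrom cs [c] (k : Int) none = -1
  · left
    refine ⟨h, ?_⟩
    have hno : ¬ [c] <:+: cs.drop k := (PySem.Chars.findFrom_natCast_eq_neg_one_iff cs [c] k hk).mp h
    intro m hm hc
    apply hno
    rw [pv_singleton_infix]
    have : cs[m]? = (cs.drop k)[m - k]? := by
      rw [List.getElem?_drop]; congr 1; omega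
    exact List.mem_of_getElem? (by rw [← this]; exact hc)
  · right
    obtain ⟨hge, hpre, hmin⟩ := PySem.Chars.findFrom_natCast_spec cs [c] k hk h
    set f := PySem.Chars.findFrom cs [c] (k : Int) none with hf
    have hf0 : 0 ≤ f := le_trans (by exact_mod_cast Nat.zero_le k) hge
    refine ⟨f.toNat, by omega, by omega, ?_, ?_⟩
    · rw [pv_singleton_prefix] at hpre
      rw [← List.head?_drop]; exact hpre
    · intro p hp1 hp2 hc
      exact hmin p hp1 hp2 (by rw [pv_singleton_prefix, List.head?_drop]; exact hc)

lemma pvAloop_fuel (cs : List Char) (start : Int) :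
    ∀ (fa fa' : Nat) (depth i : Int), (cs.length : Int) - i < fa → (cs.length : Int) - i < fa' →
    pvAloop cs start depth i fa = pvAloop cs start depth i fa' := by
  intro fa
  induction fa with
  | zero =>
    intro fa' depth i h1 h2
    have hni : ¬ i < (cs.length : Int) := by omega
    cases fa' with
    | zero => rfl
    | succ f => simp [pvAloop, hni]
  | succ f ih =>
    intro fa' depth i h1 h2
    cases fa' with
    | zero =>
      have hni : ¬ i < (cs.length : Int) := by omega
      simp [pvAloop, hni]
    | succ f' =>
      simp only [pvAloop]
      by_cases hi : i < (cs.length : Int)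
      · simp only [hi, if_true]
        cases hg : PySem.List.pyGet? cs i with
        | none => rfl
        | some c =>
          by_cases h1c : c = '{'
          · simp only [h1c, if_true]; exact ih f' _ _ (by omega) (by omega)
          · by_cases h2c : c = '}'
            · simp only [h1c, h2c, if_false, if_true]
              by_cases hd : depth - 1 = 0
              · simp [hd]
              · simp only [hd, if_false]; exact ih f' _ _ (by omega) (by omega)
            · simp only [h1c, h2c, if_false]; exact ih f' _ _ (by omega) (by omega)
      · simp [hi]

lemma pvAloop_skip (cs : List Char) (start depth : Int) :
    ∀ (d : Nat) (i : Int) (fa fa' : Nat), 0 ≤ i → i + d ≤ (cs.length : Int) →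
    (∀ p : Nat, i ≤ (p : Int) → (p : Int) < i + d → cs[p]? ≠ some '{' ∧ cs[p]? ≠ some '}') →
    (cs.length : Int) - i < fa → (cs.length : Int) - (i + d) < fa' →
    pvAloop cs start depth i fa = pvAloop cs start depth (i + d) fa' := by
  intro d
  induction d with
  | zero =>
    intro i fa fa' _ _ _ h1 h2
    simpa using pvAloop_fuel cs start fa fa' depth i h1 (by push_cast at h2 ⊢; omega)
  | succ d ih =>
    intro i fa fa' hi hle hnb h1 h2
    have hilt : i < (cs.length : Int) := by push_cast at hle; omega
    cases fa with
    | zero => omega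
    | succ f =>
      obtain ⟨c, hc⟩ : ∃ c, cs[i.toNat]? = some c :=
        ⟨cs[i.toNat]'(by omega), List.getElem?_eq_getElem _⟩
      have hg : PySem.List.pyGet? cs i = some c := by
        rw [PySem.List.pyGet?_of_nonneg cs hi]; exact hc
      have hnb' := hnb i.toNat (by omega) (by push_cast; omega)
      rw [hc] at hnb'
      have hc1 : ¬ (c = '{') := fun h => hnb'.1 (by rw [h])
      have hc2 : ¬ (c = '}') := fun h => hnb'.2 (by rw [h])
      simp only [pvAloop, hilt, if_true, hg, hc1, hc2, if_false]
      have := ih (i + 1) f fa' (by omega) (by push_cast at hle ⊢; omega)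
        (fun p hp1 hp2 => hnb p (by omega) (by push_cast at hp2 ⊢; omega))
        (by omega) (by push_cast at h2 ⊢; omega)
      convert this using 2
      push_cast; ring

lemma findFrom_gt_len (cs sub : List Char) (i : Int) (h : (cs.length : Int) < i) :
    PySem.Chars.findFrom cs sub i none = -1 := by
  have h0 : ¬ i < 0 := by omega
  simp only [PySem.Chars.findFrom, h0, if_false]
  rw [if_pos h]

lemma pvAloop_to_brace (cs : List Char) (start depth : Int) (k m : Nat) (fa : Nat) (c : Char)
    (hkm : k ≤ m) (hm : cs[m]? = some c)
    (hnb : ∀ p : Nat, k ≤ p → p < m → cs[p]? ≠ some '{' ∧ cs[p]? ≠ some '}')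
    (hfa : (cs.length : Int) - (k : Int) < fa) :
    pvAloop cs start depth (k : Int) fa =
      (if c = '{' then pvAloop cs start (depth + 1) ((m : Int) + 1) (cs.length - m)
       else if c = '}' then
         (if depth - 1 = 0 then
            some ((m : Int) + 1, String.ofList (PySem.List.slice cs (some start) (some ((m : Int) + 1))))
          else pvAloop cs start (depth - 1) ((m : Int) + 1) (cs.length - m))
       else pvAloop cs start depth ((m : Int) + 1) (cs.length - m)) := by
  have hmlt : m < cs.length := by
    by_contra h
    simp [List.getElem?_eq_none (by omega : cs.length ≤ m)] at hm
  have hskip := pvAloop_skip cs start depth (m - k) (k : Int) fa (cs.length - m + 1)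
    (by omega) (by push_cast; omega)
    (fun p hp1 hp2 => hnb p (by omega) (by push_cast at hp2; omega))
    hfa (by push_cast; omega)
  rw [show ((k : Int) + ((m - k : Nat) : Int)) = (m : Int) from by push_cast; omega] at hskip
  rw [hskip]
  have hg : PySem.List.pyGet? cs (m : Int) = some c := by
    rw [PySem.List.pyGet?_natCast]; exact hm
  have hmlt' : (m : Int) < (cs.length : Int) := by omega
  simp only [pvAloop, hmlt', if_true, hg]

lemma loop_eq (cs : List Char) (start : Int) :
    ∀ (fb : Nat) (depth i : Int) (fa : Nat), 0 ≤ i →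
    (cs.length : Int) - i < fa → (cs.length : Int) - i < fb →
    pvAloop cs start depth i fa = pvBloop cs start depth i fb := by
  intro fb
  induction fb with
  | zero =>
    intro depth i fa hi h1 h2
    have hni : ¬ i < (cs.length : Int) := by omega
    cases fa with
    | zero => rfl
    | succ f => simp [pvAloop, pvBloop, hni]
  | succ fb ih =>
    intro depth i fa hi h1 h2
    by_cases hgt : (cs.length : Int) < i
    · have hni : ¬ i < (cs.length : Int) := by omega
      simp only [pvBloop, findFrom_gt_len cs _ i hgt, if_pos (And.intro rfl rfl)]
      cases fa with
      | zero => rfl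
      | succ f => simp [pvAloop, hni]
    · have hk : i.toNat ≤ cs.length := by omega
      have hik : i = ((i.toNat : Nat) : Int) := by omega
      rw [hik]
      rcases findFrom_char cs '{' i.toNat hk with ⟨hoe, hoabs⟩ | ⟨mo, hoe, homk, hoc, homin⟩ <;>
        rcases findFrom_char cs '}' i.toNat hk with ⟨hce, hcabs⟩ | ⟨mc, hce, hcmk, hcc, hcmin⟩
      · -- no braces at all: both none
        simp only [pvBloop, hoe, hce, if_pos (And.intro rfl rfl)]
        have hskip := pvAloop_skip cs start depth (cs.length - i.toNat) (i.toNat : Int) fa 1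
          (by omega) (by push_cast; omega)
          (fun p hp1 hp2 => ⟨hoabs p (by omega), hcabs p (by omega)⟩)
          (by omega) (by push_cast; omega)
        rw [hskip]
        have : ¬ ((i.toNat : Int) + ((cs.length - i.toNat : Nat) : Int) < (cs.length : Int)) := by
          push_cast; omega
        simp only [pvAloop]
        rw [if_neg this]
        simp
      · -- only a close brace, at mc
        have hcond1 : ¬ ((-1 : Int) = -1 ∧ ((mc : Nat) : Int) = -1) := by
          intro h; omega
        have hcond2 : ¬ (((mc : Nat) : Int) = -1 ∨ ((-1 : Int) ≠ -1 ∧ (-1 : Int) < (mc : Int))) := by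
          push_neg; exact ⟨by omega, fun h => absurd rfl h⟩
        simp only [pvBloop, hoe, hce, if_neg hcond1, if_neg hcond2]
        rw [pvAloop_to_brace cs start depth i.toNat mc fa '}' hcmk hcc
          (fun p hp1 hp2 => ⟨hoabs p hp1, hcmin p hp1 hp2⟩) (by omega)]
        have hmclt : mc < cs.length := by
          by_contra h; simp [List.getElem?_eq_none (by omega : cs.length ≤ mc)] at hcc
        simp only [if_neg (by decide : ¬ ('}' = '{')), if_pos rfl]
        by_cases hd : depth - 1 = 0
        · simp [hd]
        · simp only [hd, if_false]
          exact ih (depth - 1) ((mc : Int) + 1) (cs.length - mc) (by omega)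
            (by push_cast; omega) (by omega)
      · -- only an open brace, at mo
        have hcond1 : ¬ (((mo : Nat) : Int) = -1 ∧ ((-1 : Int)) = -1) := by intro h; omega
        have hcond2 : ((-1 : Int) = -1 ∨ (((mo : Nat) : Int) ≠ -1 ∧ ((mo : Int)) < (-1 : Int))) :=
          Or.inl rfl
        simp only [pvBloop, hoe, hce, if_neg hcond1, if_pos hcond2]
        rw [pvAloop_to_brace cs start depth i.toNat mo fa '{' homk hoc
          (fun p hp1 hp2 => ⟨homin p hp1 hp2, hcabs p hp1⟩) (by omega)]
        have hmolt : mo < cs.length := by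
          by_contra h; simp [List.getElem?_eq_none (by omega : cs.length ≤ mo)] at hoc
        simp only [if_pos rfl]
        exact ih (depth + 1) ((mo : Int) + 1) (cs.length - mo) (by omega)
          (by push_cast; omega) (by omega)
      · -- both braces present
        have hne : mo ≠ mc := by
          intro h; rw [h, hcc] at hoc; exact absurd (Option.some.inj hoc) (by decide)
        have hmolt : mo < cs.length := by
          by_contra h; simp [List.getElem?_eq_none (by omega : cs.length ≤ mo)] at hoc
        have hmclt : mc < cs.length := by
          by_contra h; simp [List.getElem?_eq_none (by omega : cs.length ≤ mc)] at hcc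
        have hcond1 : ¬ (((mo : Nat) : Int) = -1 ∧ ((mc : Nat) : Int) = -1) := by intro h; omega
        by_cases hmm : mo < mc
        · have hcond2 : (((mc : Nat) : Int) = -1 ∨ (((mo : Nat) : Int) ≠ -1 ∧ ((mo : Int)) < ((mc : Int)))) :=
            Or.inr ⟨by omega, by exact_mod_cast hmm⟩
          simp only [pvBloop, hoe, hce, if_neg hcond1, if_pos hcond2]
          rw [pvAloop_to_brace cs start depth i.toNat mo fa '{' homk hoc
            (fun p hp1 hp2 => ⟨homin p hp1 hp2, hcmin p hp1 (by omega)⟩) (by omega)]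
          simp only [if_pos rfl]
          exact ih (depth + 1) ((mo : Int) + 1) (cs.length - mo) (by omega)
            (by push_cast; omega) (by omega)
        · have hmm' : mc < mo := by omega
          have hcond2 : ¬ (((mc : Nat) : Int) = -1 ∨ (((mo : Nat) : Int) ≠ -1 ∧ ((mo : Int)) < ((mc : Int)))) := by
            push_neg
            exact ⟨by omega, fun _ => by push_cast; omega⟩
          simp only [pvBloop, hoe, hce, if_neg hcond1, if_neg hcond2]
          rw [pvAloop_to_brace cs start depth i.toNat mc fa '}' hcmk hcc
            (fun p hp1 hp2 => ⟨homin p hp1 (by omega), hcmin p hp1 hp2⟩) (by omega)]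
          simp only [if_neg (by decide : ¬ ('}' = '{')), if_pos rfl]
          by_cases hd : depth - 1 = 0
          · simp [hd]
          · simp only [hd, if_false]
            exact ih (depth - 1) ((mc : Int) + 1) (cs.length - mc) (by omega)
              (by push_cast; omega) (by omega)

-- ===== VERDICT (by name: the statement is the Claim_ definition above) =====
theorem extract_plugin_body_spec : Claim_equal_extract_plugin_body := by
  intro source start _hdom hpre
  unfold Spec_extract_plugin_body extract_plugin_body extract_plugin_body_alt
  exact loop_eq source.toList start _ 0 start _ hpre (by omega) (by
    have : 0 ≤ start := hpre
    omega)
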